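-- pv_equiv track=rewrite | github.com/YangXiaoo/Lookoop | AlgorithmsPractice/algorithmsPractice-3.py | computeCompleteModule
-- ===== SOURCE A (Python) =====
-- def computeCompleteModule(medium, high, num):
--     ret = []
--     users = [medium, high]
--     def helper(curIndex, curUserCount, curModuleCount):
--         if curUserCount == num:
--             if curModuleCount not in ret:
--                 ret.append(curModuleCount)
--         else:
--             for i in range(len(users)):
--                 helper(i, curUserCount + 1, curModuleCount + users[i])
--
--     helper(0, 0, 0)
--
--     return ret
-- ===== SOURCE B (Python) =====
-- def computeCompleteModule(medium, high, num):
--     # Every leaf of A's recursion picks k highs and num-k mediums for some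
--     # 0 <= k <= num, and sums first appear in increasing order of k.
--     return list(dict.fromkeys(medium * (num - k) + high * k for k in range(num + 1)))
-- ===== Notes on version B (the rewrite author's own statement) =====
-- stated objective: faster
-- what changed: Replaced the exponential recursion over all medium/high choice sequences by a single pass over k=0..num computing medium*(num-k)+high*k and deduplicating with dict.fromkeys (first-appearance order preserved); intended as faster (O(num) vs O(2^num)) — a timing run saw A time out at num=16 where B returned, too fast for a measured ratio.
import Mathlib
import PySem

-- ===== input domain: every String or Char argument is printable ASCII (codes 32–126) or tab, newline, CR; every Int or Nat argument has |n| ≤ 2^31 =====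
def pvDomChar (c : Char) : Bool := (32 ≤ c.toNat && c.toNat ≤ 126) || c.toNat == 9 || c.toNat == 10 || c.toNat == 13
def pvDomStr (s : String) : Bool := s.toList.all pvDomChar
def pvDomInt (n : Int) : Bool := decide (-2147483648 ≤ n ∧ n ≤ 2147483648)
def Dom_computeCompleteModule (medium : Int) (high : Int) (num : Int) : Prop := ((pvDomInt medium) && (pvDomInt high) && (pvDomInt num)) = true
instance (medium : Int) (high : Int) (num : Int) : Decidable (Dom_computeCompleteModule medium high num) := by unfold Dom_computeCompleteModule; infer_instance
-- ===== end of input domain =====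

-- B replaces A's exponential recursion over all medium/high choice sequences by one pass
-- over k = 0..num (sum = medium*(num-k)+high*k) deduplicated in first-appearance order.


-- ===== PORT A =====
-- helper(curIndex, curUserCount, curModuleCount) threading 'ret'; curIndex is unused by
-- the Python body, so it is not a parameter here.  The recursion depth is num - curUserCount,
-- so 'fuel = num.toNat' at the top call suffices for every num ≥ 0 (num < 0 is excluded by Pre_:
-- there the Python recurses without bound and raises RecursionError).
def pvHelperA (users : List Int) (num : Int) (fuel : Nat) (curUserCount : Int)
    (curModuleCount : Int) (ret : List Int) : List Int :=
  if curUserCount = num then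
    if curModuleCount ∈ ret then ret else ret ++ [curModuleCount]
  else
    match fuel with
    | 0 => ret
    | f + 1 =>
      (PySem.List.pyRange 0 users.length 1).foldl
        (fun r i => pvHelperA users num f (curUserCount + 1)
          (curModuleCount + PySem.List.pyGetD users i 0) r) ret

def computeCompleteModule (medium : Int) (high : Int) (num : Int) : List Int :=
  pvHelperA [medium, high] num num.toNat 0 0 []

-- ===== PORT B =====
def computeCompleteModule_alt (medium : Int) (high : Int) (num : Int) : List Int :=
  PySem.List.dedup
    ((PySem.List.pyRange 0 (num + 1) 1).map (fun k => medium * (num - k) + high * k))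

-- ===== PRECONDITION & SPEC =====
-- Pre_ excludes num < 0, where the Python A recurses without bound (RecursionError).
def Pre_computeCompleteModule (medium : Int) (high : Int) (num : Int) : Prop := 0 ≤ num
instance (medium : Int) (high : Int) (num : Int) : Decidable (Pre_computeCompleteModule medium high num) := by unfold Pre_computeCompleteModule; infer_instance
def pvWitness_computeCompleteModule : Int × Int × Int := (2, 5, 3)

def Spec_computeCompleteModule (medium : Int) (high : Int) (num : Int) (out : List Int) : Prop := out = computeCompleteModule_alt medium high num
instance (medium : Int) (high : Int) (num : Int) (out : List Int) : Decidable (Spec_computeCompleteModule medium high num out) := by unfold Spec_computeCompleteModule; infer_instance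

-- ===== CLAIM (what is proved, stated in full; the proofs are below) =====
def Claim_equal_computeCompleteModule : Prop := ∀ (medium : Int) (high : Int) (num : Int), Dom_computeCompleteModule medium high num → Pre_computeCompleteModule medium high num → Spec_computeCompleteModule medium high num (computeCompleteModule medium high num)

-- ===== LEMMAS AND PROOFS =====

-- the multiset of leaf sums of A's recursion, in A's visiting order
def pvLeafSums (medium high : Int) (m : Int) : Nat → List Int
  | 0 => [m]
  | f + 1 => pvLeafSums medium high (m + medium) f ++ pvLeafSums medium high (m + high) f

theorem pvAdd_eq (ret : List Int) (x : Int) :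
    PySem.Set.add ret x = if x ∈ ret then ret else ret ++ [x] := by
  simp [PySem.Set.add, PySem.Set.contains]

theorem pvMem_add (ret : List Int) (x y : Int) :
    y ∈ PySem.Set.add ret x ↔ y ∈ ret ∨ y = x := by
  rw [pvAdd_eq]; split <;> simp_all

theorem pvMem_foldl_add_of_mem (l : List Int) (s : List Int) (x : Int) (h : x ∈ s) :
    x ∈ l.foldl PySem.Set.add s := by
  induction l generalizing s with
  | nil => exact h
  | cons a l ih => exact ih _ ((pvMem_add s a x).mpr (Or.inl h))

theorem pvMem_foldl_add_of_mem_list (l : List Int) (s : List Int) (x : Int) (h : x ∈ l) :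
    x ∈ l.foldl PySem.Set.add s := by
  induction l generalizing s with
  | nil => cases h
  | cons a l ih =>
    simp only [List.foldl_cons]
    rcases List.mem_cons.mp h with rfl | h
    · exact pvMem_foldl_add_of_mem _ _ _ (by simp)
    · exact ih _ h

theorem pvFoldl_add_of_subset (l : List Int) (s : List Int) (h : ∀ x ∈ l, x ∈ s) :
    l.foldl PySem.Set.add s = s := by
  induction l with
  | nil => rfl
  | cons a l ih =>
    have ha : PySem.Set.add s a = s := by rw [pvAdd_eq]; simp [h a (by simp)]
    simp only [List.foldl_cons, ha]
    exact ih (fun x hx => h x (by simp [hx]))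

-- A's helper folds Set.add over the leaf sums
theorem pvHelperA_eq (medium high num : Int) (f : Nat) :
    ∀ (c m : Int) (ret : List Int), c + f = num →
    pvHelperA [medium, high] num f c m ret
      = (pvLeafSums medium high m f).foldl PySem.Set.add ret := by
  induction f with
  | zero =>
    intro c m ret h
    simp at h
    simp [pvHelperA, h, pvLeafSums, pvAdd_eq]
  | succ f ih =>
    intro c m ret h
    have hc : c ≠ num := by omega
    rw [pvHelperA]
    simp only [if_neg hc]
    have hr : PySem.List.pyRange 0 (([medium, high] : List Int).length : Int) 1 = [0, 1] := by
      simp only [List.length_cons, List.length_nil]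
      decide
    rw [hr]
    simp only [List.foldl_cons, List.foldl_nil]
    have g0 : PySem.List.pyGetD [medium, high] (0 : Int) 0 = medium := by
      simp [PySem.List.pyGetD, PySem.List.pyGet?, PySem.List.pyIdx?]
    have g1 : PySem.List.pyGetD [medium, high] (1 : Int) 0 = high := by
      simp [PySem.List.pyGetD, PySem.List.pyGet?, PySem.List.pyIdx?]
    rw [g0, g1, ih (c + 1) (m + medium) ret (by omega),
        ih (c + 1) (m + high) _ (by omega)]
    simp [pvLeafSums, List.foldl_append]

-- folding Set.add over the leaf sums = folding it over the arithmetic progression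
theorem pvLeafSums_fold (medium high : Int) (f : Nat) :
    ∀ (m : Int) (ret : List Int),
    (pvLeafSums medium high m f).foldl PySem.Set.add ret
      = ((List.range (f + 1)).map
          (fun k : Nat => m + medium * ((f : Int) - k) + high * k)).foldl PySem.Set.add ret := by
  induction f with
  | zero => intro m ret; simp [pvLeafSums]
  | succ f ih =>
    intro m ret
    have hmed : (fun k : Nat => (m + medium) + medium * ((f : Int) - k) + high * k)
        = (fun k : Nat => m + medium * (((f : Nat) + 1 : Int) - k) + high * k) := by
      funext k; ring
    have hhigh : (fun k : Nat => (m + high) + medium * ((f : Int) - k) + high * k)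
        = (fun k : Nat => m + medium * (((f : Nat) + 1 : Int) - (k + 1)) + high * (k + 1)) := by
      funext k; ring
    set g : Nat → Int := fun k : Nat => m + medium * (((f : Nat) + 1 : Int) - k) + high * k with hg
    rw [pvLeafSums, List.foldl_append, ih, ih, hmed, hhigh]
    have hshift : ((List.range (f + 1)).map
        (fun k : Nat => m + medium * (((f : Nat) + 1 : Int) - (k + 1)) + high * (k + 1)))
        = (List.range (f + 1)).map (fun k : Nat => g (k + 1)) := rfl
    rw [hshift]
    -- split off the last element k = f of the shifted list
    have hsplit : (List.range (f + 1)).map (fun k : Nat => g (k + 1))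
        = (List.range f).map (fun k : Nat => g (k + 1)) ++ [g (f + 1)] := by
      rw [List.range_succ]; simp
    rw [hsplit, List.foldl_append]
    set acc := ((List.range (f + 1)).map g).foldl PySem.Set.add ret with hacc
    have hdup : ((List.range f).map (fun k : Nat => g (k + 1))).foldl PySem.Set.add acc = acc := by
      apply pvFoldl_add_of_subset
      intro x hx
      simp only [List.mem_map, List.mem_range] at hx
      obtain ⟨k, hk, rfl⟩ := hx
      exact pvMem_foldl_add_of_mem_list _ _ _
        (List.mem_map.mpr ⟨k + 1, List.mem_range.mpr (by omega), rfl⟩)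
    rw [hdup]
    have hfun : (fun k : Nat => m + medium * (((f + 1 : Nat) : Int) - k) + high * k) = g := by
      funext k; rw [hg]; push_cast; ring
    rw [hfun]
    have hlast : (List.range (f + 1 + 1)).map g = (List.range (f + 1)).map g ++ [g (f + 1)] := by
      rw [List.range_succ]; simp
    rw [hlast, List.foldl_append]

-- ===== VERDICT (by name: the statement is the Claim_ definition above) =====
theorem computeCompleteModule_spec : Claim_equal_computeCompleteModule := by
  intro medium high num _ hpre
  unfold Spec_computeCompleteModule computeCompleteModule computeCompleteModule_alt
  have hnum : ((num.toNat : Nat) : Int) = num := Int.toNat_of_nonneg hpre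
  rw [pvHelperA_eq medium high num num.toNat 0 0 [] (by omega), pvLeafSums_fold]
  rw [PySem.List.dedup_eq_ofList, PySem.Set.ofList_eq_foldl, PySem.List.pyRange_one]
  have hlen : (num + 1 - 0).toNat = num.toNat + 1 := by omega
  rw [hlen, List.map_map]
  congr 1
  apply List.map_congr_left
  intro k hk
  simp only [Function.comp]
  rw [hnum]
  ring
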